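-- pv_equiv track=rewrite | github.com/ahanapradhan/UnionExtraction | mysite/unmasque/src/util/utils.py | generateCombos
-- ===== SOURCE A (Python) =====
-- import copy
--
-- def generateCombos(val):
--     res = [[0]]
--     for i in range(1, val):
--         new_add = []
--         for elt in res:
--             temp = copy.deepcopy(elt)
--             temp.append(i)
--             new_add.append(temp)
--         for elt in new_add:
--             if len(elt) < val:
--                 res.append(copy.deepcopy(elt))
--     return copy.deepcopy(res)
-- ===== SOURCE B (Python) =====
-- def generateCombos(val):
--     if val < 2:
--         return [[0]]
--     res = [[0]]
--     for n in range(1, 2 ** (val - 1) - 1):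
--         res.append([0] + [j + 1 for j in range(val - 1) if n & (1 << j)])
--     return res
-- ===== Notes on version B (the rewrite author's own statement) =====
-- stated objective: simpler
-- what changed: Replaces A's incremental doubling loop (copying every existing subset each round and filtering out full-length ones) by direct bitmask enumeration: the k-th emitted subset is read straight off the bits of k, reproducing A's binary-counting order, the always-present singleton seed, and the exclusion of the full set via the range bound.
import Mathlib
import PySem

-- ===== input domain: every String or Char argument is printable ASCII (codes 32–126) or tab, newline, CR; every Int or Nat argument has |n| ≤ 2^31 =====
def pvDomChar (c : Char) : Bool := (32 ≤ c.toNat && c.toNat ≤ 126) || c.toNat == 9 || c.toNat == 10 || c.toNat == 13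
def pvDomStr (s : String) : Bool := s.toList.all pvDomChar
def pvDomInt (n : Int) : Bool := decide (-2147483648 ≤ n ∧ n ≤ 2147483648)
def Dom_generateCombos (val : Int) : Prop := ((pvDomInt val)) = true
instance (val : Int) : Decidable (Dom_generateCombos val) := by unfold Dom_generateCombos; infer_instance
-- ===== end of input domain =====

-- B replaces A's incremental doubling loop (with its deepcopies) by direct bitmask
-- enumeration: the n-th emitted subset is read off the bits of n.

-- ===== PORT A =====
def generateCombos (val : Int) : List (List Int) :=
  (PySem.List.pyRange 1 val).foldl
    (fun res i =>
      let new_add := res.foldl (fun acc elt => acc ++ [elt ++ [i]]) []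
      new_add.foldl (fun r elt => if (elt.length : Int) < val then r ++ [elt] else r) res)
    [[0]]

-- ===== PORT B =====
def generateCombos_alt (val : Int) : List (List Int) :=
  if val < 2 then [[0]]
  else
    (PySem.List.pyRange 1 ((2 : Int) ^ (val - 1).toNat - 1)).foldl
      (fun res n =>
        res ++ [0 :: ((PySem.List.pyRange 0 (val - 1)).filter
            (fun j => n.toNat &&& (1 <<< j.toNat) != 0)).map (fun j => j + 1)])
      [[0]]

-- ===== PRECONDITION & SPEC =====
def Spec_generateCombos (val : Int) (out : List (List Int)) : Prop := out = generateCombos_alt val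
instance (val : Int) (out : List (List Int)) : Decidable (Spec_generateCombos val out) := by unfold Spec_generateCombos; infer_instance

-- ===== CLAIM (what is proved, stated in full; the proofs are below) =====
def Claim_equal_generateCombos : Prop := ∀ (val : Int), Dom_generateCombos val → Spec_generateCombos val (generateCombos val)

-- ===== LEMMAS AND PROOFS =====

-- the subset emitted for bitmask n (values j+1 for the set bits j, prefixed by 0)
def combo (k n : Nat) : List Int :=
  0 :: ((List.range k).filter (fun j => n.testBit j)).map (fun j : Nat => (j : Int) + 1)

-- A's filter predicate, specialised to val = k + 1
def keepP (k : Nat) (l : List Int) : Bool := decide ((l.length : Int) < (k : Int) + 1)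

-- one iteration of A's outer loop
def stepA (val : Int) (res : List (List Int)) (i : Int) : List (List Int) :=
  let new_add := res.foldl (fun acc elt => acc ++ [elt ++ [i]]) []
  new_add.foldl (fun r elt => if (elt.length : Int) < val then r ++ [elt] else r) res

theorem genA_eq (val : Int) :
    generateCombos val = (PySem.List.pyRange 1 val).foldl (stepA val) [[0]] := rfl

theorem stepA_eq (val : Int) (res : List (List Int)) (i : Int) :
    stepA val res i
      = res ++ (res.map (· ++ [i])).filter (fun elt => decide ((elt.length : Int) < val)) := by
  have h : (fun (r : List (List Int)) (elt : List Int) =>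
        if (elt.length : Int) < val then r ++ [elt] else r)
      = (fun r elt =>
        if (fun (e : List Int) => decide ((e.length : Int) < val)) elt = true
        then r ++ [id elt] else r) := by
    funext r elt; simp
  simp only [stepA, PySem.List.foldl_append_singleton_eq_map, List.nil_append]
  rw [h, PySem.List.foldl_append_if]
  simp

theorem pyRange_nil {a b : Int} (h : b ≤ a) : PySem.List.pyRange a b = [] := by
  apply List.eq_nil_iff_forall_not_mem.mpr
  intro x hx
  have := PySem.List.mem_pyRange_one.mp hx
  omega

theorem combo_zero (k : Nat) : combo k 0 = [0] := by
  simp [combo, Nat.zero_testBit]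

-- the support of n < 2^m uses only bits below m
theorem filter_testBit_lt (k m n : Nat) (hm : m ≤ k) (hn : n < 2 ^ m) :
    (List.range k).filter (fun j => n.testBit j)
      = (List.range m).filter (fun j => n.testBit j) := by
  have hk : k = m + (k - m) := by omega
  rw [hk, List.range_add, List.filter_append]
  have h0 : ((List.range (k - m)).map (fun x => m + x)).filter (fun j => n.testBit j) = [] := by
    apply List.filter_eq_nil_iff.mpr
    intro j hj
    simp only [List.mem_map] at hj
    obtain ⟨x, _, rfl⟩ := hj
    have : n < 2 ^ (m + x) :=
      lt_of_lt_of_le hn (Nat.pow_le_pow_right (by norm_num) (by omega))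
    simp [Nat.testBit_lt_two_pow this]
  simp [h0]

-- key step: adding bit m appends the value m+1 at the end
theorem combo_add (k m n : Nat) (hm : m < k) (hn : n < 2 ^ m) :
    combo k (n + 2 ^ m) = combo k n ++ [(m : Int) + 1] := by
  have hrw : n + 2 ^ m = 2 ^ m + n := Nat.add_comm _ _
  have hfilt : (List.range k).filter (fun j => (n + 2 ^ m).testBit j)
      = (List.range m).filter (fun j => n.testBit j) ++ [m] := by
    have hlt : n + 2 ^ m < 2 ^ (m + 1) := by
      have h2 : (2 : Nat) ^ (m + 1) = 2 ^ m + 2 ^ m := by ring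
      omega
    rw [filter_testBit_lt k (m + 1) (n + 2 ^ m) (by omega) hlt]
    rw [List.range_succ, List.filter_append]
    have h1 : (List.range m).filter (fun j => (n + 2 ^ m).testBit j)
        = (List.range m).filter (fun j => n.testBit j) := by
      apply List.filter_congr
      intro j hj
      simp only [List.mem_range] at hj
      rw [hrw, Nat.testBit_two_pow_add_gt hj]
    have h2 : (n + 2 ^ m).testBit m = true := by
      rw [hrw, Nat.testBit_two_pow_add_eq, Nat.testBit_lt_two_pow hn]
      rfl
    simp [h1, h2]
  rw [combo, combo, hfilt, filter_testBit_lt k m n (by omega) hn]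
  simp

-- A's loop invariant, over the first m iterations
theorem A_inv (k : Nat) (hk : 1 ≤ k) : ∀ m, m ≤ k →
    (PySem.List.pyRange 1 ((m : Int) + 1)).foldl (stepA ((k : Int) + 1)) [[0]]
      = ((List.range (2 ^ m)).filter (fun n => keepP k (combo k n))).map (combo k) := by
  intro m
  induction m with
  | zero =>
    intro _
    rw [show ((0 : Nat) : Int) + 1 = 1 by norm_num, pyRange_nil (by omega), List.foldl_nil]
    have h0 : keepP k (combo k 0) = true := by
      rw [combo_zero]
      simp only [keepP, List.length_cons, List.length_nil]
      simp
      omega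
    have hf : List.filter (fun n => keepP k (combo k n)) [0] = [0] := by
      simp [h0]
    simp [List.range_one, hf, combo_zero]
  | succ m ih =>
    intro hm
    have hmk : m < k := by omega
    have hsplit : PySem.List.pyRange 1 ((↑(m + 1) : Int) + 1)
        = PySem.List.pyRange 1 ((m : Int) + 1) ++ [(m : Int) + 1] := by
      have h := PySem.List.pyRange_one_succ_right (a := 1) (b := (m : Int) + 1) (by omega)
      rw [← h]
      push_cast
      ring_nf
    rw [hsplit, List.foldl_append, ih (by omega), List.foldl_cons, List.foldl_nil, stepA_eq]
    set pk : Nat → Bool := fun n => keepP k (combo k n) with hpk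
    set G := (List.range (2 ^ m)).filter pk with hG
    have hmem : ∀ n ∈ G, n < 2 ^ m := by
      intro n hn
      exact List.mem_range.mp (List.mem_filter.mp hn).1
    have e1 : (G.map (combo k)).map (· ++ [(m : Int) + 1])
        = (G.map (· + 2 ^ m)).map (combo k) := by
      rw [List.map_map, List.map_map]
      apply List.map_congr_left
      intro n hn
      simp only [Function.comp]
      exact (combo_add k m n hmk (hmem n hn)).symm
    have hpred : (fun (elt : List Int) => decide ((elt.length : Int) < (k : Int) + 1))
        = keepP k := rfl
    have e2 : ((G.map (· + 2 ^ m)).map (combo k)).filter (keepP k)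
        = ((G.map (· + 2 ^ m)).filter pk).map (combo k) := by
      rw [List.filter_map]
      rfl
    have e3 : (G.map (· + 2 ^ m)).filter pk
        = ((List.range (2 ^ m)).map (· + 2 ^ m)).filter pk := by
      rw [hG, List.filter_map, List.filter_map]
      congr 1
      rw [List.filter_filter]
      apply List.filter_congr
      intro n hn
      have hn' : n < 2 ^ m := List.mem_range.mp hn
      by_cases h : (pk ∘ (· + 2 ^ m)) n = true
      · have hpkn : pk n = true := by
          simp only [hpk, Function.comp, keepP, combo_add k m n hmk hn',
            List.length_append, List.length_cons, List.length_nil,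
            decide_eq_true_eq] at h ⊢
          push_cast at h ⊢
          omega
        simp [hpkn]
      · have h' : pk (n + 2 ^ m) = false := by
          simpa [Function.comp] using h
        simp [h']
    have e4 : (List.range (2 ^ (m + 1))).filter pk
        = G ++ ((List.range (2 ^ m)).map (· + 2 ^ m)).filter pk := by
      have h2 : 2 ^ (m + 1) = 2 ^ m + 2 ^ m := by ring
      rw [h2, List.range_add, List.filter_append, hG]
      congr 2
      apply List.map_congr_left
      intro x _
      exact Nat.add_comm _ _
    rw [hpred, e1, e2, e3, e4, List.map_append]

theorem combo_length (k n : Nat) :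
    (combo k n).length = ((List.range k).filter (fun j => n.testBit j)).length + 1 := by
  simp [combo]

-- A's filter only ever rejects the full subset, which is the last one
theorem filter_keep (k : Nat) :
    (List.range (2 ^ k)).filter (fun n => keepP k (combo k n)) = List.range (2 ^ k - 1) := by
  have h1 : 1 ≤ 2 ^ k := Nat.one_le_two_pow
  have h2 : 2 ^ k = (2 ^ k - 1) + 1 := by omega
  rw [h2, List.range_succ, List.filter_append]
  have hlast : keepP k (combo k (2 ^ k - 1)) = false := by
    have hfull : (List.range k).filter (fun j => (2 ^ k - 1).testBit j) = List.range k := by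
      apply List.filter_eq_self.mpr
      intro j hj
      simp [Nat.testBit_two_pow_sub_one, List.mem_range.mp hj]
    simp only [keepP, combo, hfull, List.length_cons, List.length_map, List.length_range,
      decide_eq_false_iff_not, not_lt]
    push_cast
    omega
  have hrest : (List.range (2 ^ k - 1)).filter (fun n => keepP k (combo k n))
      = List.range (2 ^ k - 1) := by
    apply List.filter_eq_self.mpr
    intro n hn
    have hn' : n < 2 ^ k - 1 := List.mem_range.mp hn
    have hc : ((List.range k).filter (fun j => n.testBit j)).length < k := by
      have hlt : ((List.range k).filter (fun j => n.testBit j)).length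
          < (List.range k).length := by
        apply List.length_filter_lt_length_iff_exists.mpr
        by_contra hall
        push Not at hall
        have hn2 : n = 2 ^ k - 1 := by
          apply Nat.eq_of_testBit_eq
          intro i
          rw [Nat.testBit_two_pow_sub_one]
          by_cases hik : i < k
          · have := hall i (List.mem_range.mpr hik)
            simp [hik, this]
          · have hk2 : (2 : Nat) ^ k ≤ 2 ^ i := Nat.pow_le_pow_right (by norm_num) (by omega)
            have hni : n < 2 ^ i := by omega
            simp [Nat.testBit_lt_two_pow hni, hik]
        exact absurd hn2 (by omega)
      simpa using hlt
    simp only [keepP, combo_length, decide_eq_true_eq]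
    omega
  have hsing : List.filter (fun n => keepP k (combo k n)) [2 ^ k - 1] = [] := by
    simp [hlast]
  rw [hrest, hsing, List.append_nil]
  all_goals congr 1

-- B's loop body produces exactly combo k (t+1)
theorem B_body_eq (k t : Nat) :
    (0 : Int) :: ((PySem.List.pyRange 0 ((k : Int) + 1 - 1)).filter
        (fun j => ((((t + 1 : Nat) : Int)).toNat &&& (1 <<< j.toNat) != 0))).map (fun j => j + 1)
      = combo k (t + 1) := by
  have hval : ((k : Int) + 1) - 1 = (k : Int) := by ring
  rw [hval, PySem.List.pyRange_zero_natCast, List.filter_map, List.map_map]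
  have hpred : List.filter
        ((fun j => ((((t + 1 : Nat) : Int)).toNat &&& (1 <<< j.toNat) != 0)) ∘ (fun x : Nat => (x : Int)))
        (List.range k)
      = List.filter (fun j => (t + 1).testBit j) (List.range k) := by
    apply List.filter_congr
    intro j _
    simp only [Function.comp, Int.toNat_natCast, Nat.shiftLeft_eq, one_mul,
      Nat.and_two_pow]
    cases h : (t + 1).testBit j <;> simp
  rw [hpred, combo]
  all_goals congr 1

theorem B_eq (k : Nat) (hk : 1 ≤ k) :
    generateCombos_alt ((k : Int) + 1) = (List.range (2 ^ k - 1)).map (combo k) := by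
  rw [generateCombos_alt, if_neg (by omega)]
  have hk' : (((k : Int) + 1) - 1).toNat = k := by omega
  rw [hk']
  set M := 2 ^ k - 1 with hM
  have h2k : 2 ≤ 2 ^ k := by
    calc 2 = 2 ^ 1 := by norm_num
    _ ≤ 2 ^ k := Nat.pow_le_pow_right (by norm_num) hk
  have hM1 : 1 ≤ M := by omega
  have hcastpow : ((2 ^ k : Nat) : Int) = (2 : Int) ^ k := by push_cast; ring
  have hcast : (2 : Int) ^ k - 1 = (M : Int) := by
    show _ = ((2 ^ k - 1 : Nat) : Int)
    rw [Nat.cast_sub (by omega : 1 ≤ 2 ^ k), hcastpow]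
    norm_num
  rw [hcast, PySem.List.foldl_append_singleton_eq_map]
  have hr : PySem.List.pyRange 1 (M : Int)
      = (List.range (M - 1)).map (fun t => ((t + 1 : Nat) : Int)) := by
    have h0 : PySem.List.pyRange 0 (M : Int) = 0 :: PySem.List.pyRange 1 (M : Int) := by
      have h := PySem.List.pyRange_one_cons (a := 0) (b := (M : Int)) (by exact_mod_cast hM1)
      simpa using h
    have h1 : PySem.List.pyRange 0 (M : Int) = (List.range M).map (fun t : Nat => (t : Int)) :=
      PySem.List.pyRange_zero_natCast M
    have h3 : List.range M = 0 :: (List.range (M - 1)).map (fun t => t + 1) := by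
      conv_lhs => rw [show M = (M - 1) + 1 by omega]
      rw [List.range_succ_eq_map]
    rw [h3, List.map_cons, List.map_map] at h1
    rw [h0] at h1
    have := (List.cons.injEq _ _ _ _).mp h1
    rw [this.2]
    rfl
  rw [hr, List.map_map]
  conv_rhs => rw [show M = (M - 1) + 1 by omega, List.range_succ_eq_map, List.map_cons,
    List.map_map]
  have hbody : ∀ t ∈ List.range (M - 1),
      ((fun n => (0 : Int) :: ((PySem.List.pyRange 0 ((k : Int) + 1 - 1)).filter
          (fun j => (Int.toNat n &&& (1 <<< j.toNat) != 0))).map (fun j => j + 1))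
        ∘ (fun t => ((t + 1 : Nat) : Int))) t
      = (combo k ∘ (fun t => t + 1)) t := by
    intro t _
    simp only [Function.comp]
    exact B_body_eq k t
  rw [List.map_congr_left hbody]
  simp [combo_zero]

-- ===== VERDICT (by name: the statement is the Claim_ definition above) =====
theorem generateCombos_spec : Claim_equal_generateCombos := by
  intro val _
  unfold Spec_generateCombos
  by_cases h : val < 2
  · rw [genA_eq, pyRange_nil (by omega), List.foldl_nil, generateCombos_alt, if_pos h]
  · have hval : val = ((val - 1).toNat : Int) + 1 := by omega
    set k := (val - 1).toNat with hk
    have hk1 : 1 ≤ k := by omega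
    rw [hval, genA_eq, B_eq k hk1, A_inv k hk1 k le_rfl, filter_keep k]
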